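-- pv_equiv track=rewrite | github.com/lpelczar/Game-Inventory | gameInventory.py | remove_from_inventory
-- ===== SOURCE A (Python) =====
-- def remove_from_inventory(inventory, removed_items):
--     """Removes from the inventory dictionary a list of items from removed_items.
--
--     Args:
--         inventory(dict): our inventory
--         removed_items(list): list of items which we want to remove from our inventory
--     Returns:
--         inventory(dict): our inventory with removed items
--     """
--     for i in removed_items:
--         if i in inventory.keys():
--             if inventory[i] > 1:
--                 inventory[i] -= 1
--             else:
--                 del inventory[i]
--     return inventory
-- ===== SOURCE B (Python) =====
-- def remove_from_inventory(inventory, removed_items):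
--     """Aggregate form: count the removed items once, then apply one
--     subtraction (or deletion) per distinct item, mutating inventory in place."""
--     counts = {}
--     for i in removed_items:
--         counts[i] = counts.get(i, 0) + 1
--     for i, c in counts.items():
--         if i in inventory:
--             if inventory[i] - c > 0:
--                 inventory[i] = inventory[i] - c
--             else:
--                 del inventory[i]
--     return inventory
-- ===== Notes on version B (the rewrite author's own statement) =====
-- stated objective: alternative
-- what changed: B first builds a dict of removal counts in one pass and then applies a single aggregate subtraction (or deletion) per distinct item, instead of A's per-occurrence decrement-with-delete-at-1 loop; both mutate inventory in place.
import Mathlib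
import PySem

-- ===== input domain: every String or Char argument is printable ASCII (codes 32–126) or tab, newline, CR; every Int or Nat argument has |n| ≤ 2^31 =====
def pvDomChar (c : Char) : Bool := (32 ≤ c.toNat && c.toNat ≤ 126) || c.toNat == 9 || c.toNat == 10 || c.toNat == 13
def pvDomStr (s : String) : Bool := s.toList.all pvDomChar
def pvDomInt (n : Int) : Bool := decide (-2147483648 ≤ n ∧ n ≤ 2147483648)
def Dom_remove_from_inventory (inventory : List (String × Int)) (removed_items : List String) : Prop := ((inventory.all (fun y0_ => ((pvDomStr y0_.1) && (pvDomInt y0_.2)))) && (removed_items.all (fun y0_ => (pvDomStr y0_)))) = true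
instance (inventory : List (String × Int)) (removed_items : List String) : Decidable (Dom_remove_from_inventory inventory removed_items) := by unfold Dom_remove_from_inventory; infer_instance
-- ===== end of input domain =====

-- B counts the removed items once and applies one aggregate subtraction/deletion per
-- distinct item, instead of A's per-occurrence decrement loop (alternative decomposition,
-- similar cost). Both Pythons mutate `inventory` in place and return that same dict;
-- the equality proved is about the returned dict.

-- ===== PORT A =====
def remove_from_inventory (inventory : List (String × Int)) (removed_items : List String) : List (String × Int) :=
  (removed_items.foldl
    (fun d i =>
      if d.contains i then
        if d.getD i 0 > 1 then d.insert i (d.getD i 0 - 1) else d.erase i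
      else d)
    (PySem.Dict.ofList inventory)).items

-- ===== PORT B =====
def remove_from_inventory_alt (inventory : List (String × Int)) (removed_items : List String) : List (String × Int) :=
  let counts : PySem.Dict String Int :=
    removed_items.foldl (fun d i => d.insert i (d.getD i 0 + 1)) PySem.Dict.empty
  (counts.items.foldl
    (fun d p =>
      if d.contains p.1 then
        if d.getD p.1 0 - p.2 > 0 then d.insert p.1 (d.getD p.1 0 - p.2) else d.erase p.1
      else d)
    (PySem.Dict.ofList inventory)).items

-- ===== PRECONDITION & SPEC =====
def Spec_remove_from_inventory (inventory : List (String × Int)) (removed_items : List String) (out : List (String × Int)) : Prop := out = remove_from_inventory_alt inventory removed_items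
instance (inventory : List (String × Int)) (removed_items : List String) (out : List (String × Int)) : Decidable (Spec_remove_from_inventory inventory removed_items out) := by unfold Spec_remove_from_inventory; infer_instance

-- ===== CLAIM (what is proved, stated in full; the proofs are below) =====
def Claim_equal_remove_from_inventory : Prop := ∀ (inventory : List (String × Int)) (removed_items : List String), Dom_remove_from_inventory inventory removed_items → Spec_remove_from_inventory inventory removed_items (remove_from_inventory inventory removed_items)

-- ===== LEMMAS AND PROOFS =====

def pvFB (i : String) (c : Int) (p : String × Int) : Option (String × Int) :=
  if p.1 = i then (if p.2 - c > 0 then some (p.1, p.2 - c) else none) else some p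

def pvG (cnt : String → Int) (p : String × Int) : Option (String × Int) :=
  if cnt p.1 = 0 then some p
  else if p.2 - cnt p.1 > 0 then some (p.1, p.2 - cnt p.1) else none

def pvGB (L : List (String × Int)) (p : String × Int) : Option (String × Int) :=
  match L.find? (fun q => q.1 == p.1) with
  | none => some p
  | some q => if p.2 - q.2 > 0 then some (p.1, p.2 - q.2) else none

-- pvFB preserves the key
theorem pvFB_key (i : String) (c : Int) (p q : String × Int) (h : pvFB i c p = some q) : q.1 = p.1 := by
  unfold pvFB at h
  split_ifs at h <;> simp at h <;> simp [← h]

theorem map_fst_filterMap_sublist (f : String × Int → Option (String × Int))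
    (hf : ∀ p q, f p = some q → q.1 = p.1) (l : List (String × Int)) :
    ((l.filterMap f).map Prod.fst).Sublist (l.map Prod.fst) := by
  induction l with
  | nil => simp
  | cons a t ih =>
    cases h : f a with
    | none => simpa [List.filterMap_cons, h] using ih.cons _
    | some q =>
      simp only [List.filterMap_cons, h, List.map_cons, hf a q h]
      exact ih.cons₂ _

theorem filterMap_eq_filter_of (l : List (String × Int)) (f : String × Int → Option (String × Int))
    (pred : String × Int → Bool) (h : ∀ p ∈ l, f p = if pred p then some p else none) :
    l.filterMap f = l.filter pred := by
  induction l with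
  | nil => simp
  | cons a t ih =>
    have ha := h a (by simp)
    by_cases hp : pred a <;>
      simp_all [List.filterMap_cons, List.filter_cons, fun p hp => h p (List.mem_cons_of_mem a hp)]

-- effect of one B-style step on the items list
theorem stepB_items (d : PySem.Dict String Int) (hnd : d.keys.Nodup) (i : String) (c : Int) :
    (if d.contains i then
       if d.getD i 0 - c > 0 then d.insert i (d.getD i 0 - c) else d.erase i
     else d).items
    = d.items.filterMap (pvFB i c) := by
  by_cases hc : d.contains i = true
  · have hs : (d.get? i).isSome = true := by
      rw [← PySem.Dict.contains_eq_isSome_get?]; exact hc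
    rcases Option.isSome_iff_exists.mp hs with ⟨v, hv⟩
    have hmem : (i, v) ∈ d.items := PySem.Dict.mem_items_of_get?_eq_some d hv
    have hgd : d.getD i 0 = v := PySem.Dict.getD_of_get?_eq_some d 0 hv
    have hval : ∀ p ∈ d.items, p.1 = i → p.2 = v := by
      intro p hp h1
      have : d.getD p.1 0 = p.2 := PySem.Dict.getD_of_mem_items d (by rcases p with ⟨a,b⟩; simpa [h1] using hp) hnd 0
      rw [h1, hgd] at this; omega
    rw [hc]; simp only [if_true]
    by_cases hpos : d.getD i 0 - c > 0
    · rw [if_pos hpos]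
      rw [PySem.Dict.items_insert_of_contains d _ hc]
      have : d.items.filterMap (pvFB i c)
          = d.items.filterMap (fun p => some (if p.1 == i then (i, d.getD i 0 - c) else p)) := by
        apply List.filterMap_congr
        intro p hp
        by_cases h1 : p.1 = i
        · have h2 := hval p hp h1
          simp [pvFB, h1, h2, ← hgd]
          omega
        · simp [pvFB, h1]
      rw [this, show (fun p : String × Int => some (if p.1 == i then (i, d.getD i 0 - c) else p)) = some ∘ (fun p : String × Int => if p.1 == i then (i, d.getD i 0 - c) else p) from rfl, List.filterMap_eq_map]
    · rw [if_neg hpos]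
      show (d.items.filter _) = _
      rw [filterMap_eq_filter_of d.items (pvFB i c) (fun p => !(p.1 == i))]
      intro p hp
      by_cases h1 : p.1 = i
      · have h2 := hval p hp h1
        simp [pvFB, h1]
        omega
      · simp [pvFB, h1]
  · rw [if_neg hc]
    have : ∀ p ∈ d.items, p.1 ≠ i := by
      intro p hp h1
      exact hc (List.any_eq_true.mpr ⟨p, hp, by simp [h1]⟩)
    rw [show d.items.filterMap (pvFB i c) = d.items.filterMap some from
      List.filterMap_congr (fun p hp => by simp [pvFB, this p hp])]
    simp

theorem stepB_keys_nodup (d : PySem.Dict String Int) (hnd : d.keys.Nodup) (i : String) (c : Int) :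
    (if d.contains i then
       if d.getD i 0 - c > 0 then d.insert i (d.getD i 0 - c) else d.erase i
     else d).keys.Nodup := by
  show ((if d.contains i then
       if d.getD i 0 - c > 0 then d.insert i (d.getD i 0 - c) else d.erase i
     else d).items.map Prod.fst).Nodup
  rw [stepB_items d hnd i c]
  exact (map_fst_filterMap_sublist _ (pvFB_key i c) _).nodup hnd

theorem find?_beq_self (l : List String) (x : String) :
    l.find? (fun k => k == x) = if x ∈ l then some x else none := by
  induction l with
  | nil => simp
  | cons a t ih =>
    by_cases h : a = x
    · simp [List.find?_cons, h]
    · have h' : ¬x = a := fun hx => h hx.symm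
      simp [List.find?_cons, h, h', ih]

theorem pvFB_bind_pvGB (i : String) (c : Int) (t : List (String × Int))
    (hi : ∀ q ∈ t, q.1 ≠ i) (p : String × Int) :
    (pvFB i c p).bind (pvGB t) = pvGB ((i, c) :: t) p := by
  rcases p with ⟨p1, p2⟩
  by_cases h1 : p1 = i
  · subst h1
    have hf : t.find? (fun q => q.1 == p1) = none := by
      rw [List.find?_eq_none]
      intro q hq
      simp [hi q hq]
    by_cases h2 : c < p2
    · simp [pvFB, pvGB, h2, List.find?_cons, hf]
    · simp [pvFB, pvGB, h2, List.find?_cons, hf]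
  · simp [pvFB, pvGB, h1, List.find?_cons, Ne.symm h1]

theorem foldB (L : List (String × Int)) :
    ∀ d : PySem.Dict String Int, d.keys.Nodup → (L.map Prod.fst).Nodup →
    (L.foldl
      (fun d p =>
        if d.contains p.1 then
          if d.getD p.1 0 - p.2 > 0 then d.insert p.1 (d.getD p.1 0 - p.2) else d.erase p.1
        else d) d).items
    = d.items.filterMap (pvGB L) := by
  induction L with
  | nil => intro d _ _; simp [pvGB]
  | cons a t ih =>
    intro d hnd hL
    have hL' : (a.1 :: t.map Prod.fst).Nodup := by rw [List.map_cons] at hL; exact hL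
    rw [List.foldl_cons, ih _ (stepB_keys_nodup d hnd a.1 a.2) hL'.of_cons,
        stepB_items d hnd a.1 a.2, List.filterMap_filterMap]
    apply List.filterMap_congr
    intro p _
    have hi : ∀ q ∈ t, q.1 ≠ a.1 := by
      intro q hq h
      exact (List.nodup_cons.mp hL').1 (h ▸ List.mem_map.mpr ⟨q, hq, rfl⟩)
    rw [pvFB_bind_pvGB a.1 a.2 t hi p]

theorem pvFB_one_bind_pvG (i : String) (rest : List String) (p : String × Int) :
    (pvFB i 1 p).bind (pvG (fun k => (rest.count k : Int)))
    = pvG (fun k => ((i :: rest).count k : Int)) p := by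
  rcases p with ⟨p1, p2⟩
  by_cases h1 : p1 = i
  · subst h1
    have hcnt : (p1 :: rest).count p1 = rest.count p1 + 1 := by simp [List.count_cons]
    have h0 : ¬((rest.count p1 : Int) + 1 = 0) := by omega
    by_cases h2 : (1 : Int) < p2
    · by_cases h3 : rest.count p1 = 0
      · simp [pvFB, pvG, h2, h3, hcnt]
      · by_cases h4 : (rest.count p1 : Int) + 1 < p2
        · have h5 : (rest.count p1 : Int) < p2 - 1 := by omega
          simp [pvFB, pvG, h2, h3, h4, h5, hcnt, h0]
          omega
        · have h5 : ¬((rest.count p1 : Int) < p2 - 1) := by omega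
          simp [pvFB, pvG, h2, h3, h4, h5, hcnt, h0]
    · have h4 : ¬((rest.count p1 : Int) + 1 < p2) := by omega
      simp [pvFB, pvG, h2, h4, hcnt, h0]
  · have h1' : ¬i = p1 := fun h => h1 h.symm
    have hcnt : (i :: rest).count p1 = rest.count p1 := by simp [List.count_cons]; exact h1'
    simp [pvFB, pvG, h1, h1', hcnt]

theorem foldA (rem : List String) :
    ∀ d : PySem.Dict String Int, d.keys.Nodup →
    (rem.foldl
      (fun d i =>
        if d.contains i then
          if d.getD i 0 > 1 then d.insert i (d.getD i 0 - 1) else d.erase i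
        else d) d).items
    = d.items.filterMap (pvG (fun k => (rem.count k : Int))) := by
  induction rem with
  | nil => intro d _; simp [pvG]
  | cons i rest ih =>
    intro d hnd
    have hstep :
        (if d.contains i then
           if d.getD i 0 > 1 then d.insert i (d.getD i 0 - 1) else d.erase i
         else d)
        = (if d.contains i then
             if d.getD i 0 - 1 > 0 then d.insert i (d.getD i 0 - 1) else d.erase i
           else d) := by
      by_cases hc : d.contains i
      · by_cases hv : d.getD i 0 > 1
        · rw [if_pos hc, if_pos hc, if_pos hv, if_pos (by omega)]
        · rw [if_pos hc, if_pos hc, if_neg hv, if_neg (by omega)]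
      · rw [if_neg hc, if_neg hc]
    rw [List.foldl_cons, hstep, ih _ (stepB_keys_nodup d hnd i 1),
        stepB_items d hnd i 1, List.filterMap_filterMap]
    exact List.filterMap_congr (fun p _ => pvFB_one_bind_pvG i rest p)

theorem pvGB_counter (rem : List String) (p : String × Int) :
    pvGB ((PySem.Dict.counter rem).items) p = pvG (fun k => (rem.count k : Int)) p := by
  unfold pvGB pvG
  rw [PySem.Dict.items_counter, List.find?_map]
  have hcomp : ((fun q : String × Int => q.1 == p.1) ∘ fun k => (k, (rem.count k : Int)))
      = fun k => k == p.1 := rfl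
  rw [hcomp, find?_beq_self]
  by_cases hm : p.1 ∈ rem
  · have hm' : p.1 ∈ PySem.Set.ofList rem := (PySem.Set.mem_ofList rem p.1).mpr hm
    have hc : rem.count p.1 ≠ 0 := by
      have := List.count_pos_iff.mpr hm; omega
    simp [hm', hc]
  · have hm' : p.1 ∉ PySem.Set.ofList rem := fun h => hm ((PySem.Set.mem_ofList rem p.1).mp h)
    have hc : rem.count p.1 = 0 := List.count_eq_zero.mpr hm
    simp [hm', hc]

-- ===== VERDICT (by name: the statement is the Claim_ definition above) =====
theorem remove_from_inventory_spec : Claim_equal_remove_from_inventory := by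
  intro inventory removed_items _
  unfold Spec_remove_from_inventory remove_from_inventory remove_from_inventory_alt
  rw [PySem.Dict.foldl_insert_getD_add_one_eq_counter]
  rw [foldA removed_items _ (PySem.Dict.nodup_keys_ofList inventory),
      foldB ((PySem.Dict.counter removed_items).items) _ (PySem.Dict.nodup_keys_ofList inventory)
        (PySem.Dict.nodup_keys_counter removed_items)]
  exact List.filterMap_congr (fun p _ => (pvGB_counter removed_items p).symm)
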